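-- pv_equiv track=rewrite | github.com/manwar/perlweeklychallenge-club | challenge-344/lubos-kolouch/python/ch-2.py | array_formation
-- ===== SOURCE A (Python) =====
-- def array_formation(source: list[list[int]], target: list[int]) -> bool:
--     """
--     Determine if ``target`` can be constructed by concatenating subarrays from ``source``.
--
--     Args:
--         source (list[list[int]]): Available subarrays that may be reordered but not restructured.
--         target (list[int]): Desired array to build.
--
--     Returns:
--         bool: ``True`` if the target can be formed, otherwise ``False``.
--     """
--     used = [False] * len(source)
--     index = 0
--
--     while index < len(target):
--         matched = False
--
--         for i, piece in enumerate(source):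
--             if used[i] or not piece or piece[0] != target[index]:
--                 continue
--
--             if index + len(piece) > len(target):
--                 continue
--
--             if all(target[index + offset] == value
--                    for offset, value in enumerate(piece)):
--                 used[i] = True
--                 index += len(piece)
--                 matched = True
--                 break
--
--         if not matched:
--             return False
--
--     return True
-- ===== SOURCE B (Python) =====
-- def array_formation(source: list[list[int]], target: list[int]) -> bool:
--     # Hash every piece (by full content) once, remembering source indices in order;
--     # at each position pick, over the distinct piece lengths, the matching piece
--     # with the smallest unused source index (= the one A's scan would take).
--     table = {}
--     for idx, piece in enumerate(source):
--         if piece: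
--             table.setdefault(tuple(piece), []).append(idx)
--     lengths = sorted({len(p) for p in source if p})
--     i, n = 0, len(target)
--     while i < n:
--         best = None  # (source index, piece length)
--         for L in lengths:
--             if i + L > n:
--                 continue
--             idxs = table.get(tuple(target[i:i + L]))
--             if idxs and (best is None or idxs[0] < best[0]):
--                 best = (idxs[0], L)
--         if best is None:
--             return False
--         L = best[1]
--         table[tuple(target[i:i + L])].pop(0)
--         i += L
--     return True
-- ===== Notes on version B (the rewrite author's own statement) =====
-- stated objective: alternative
-- what changed: B drops A's per-step linear rescan of source with a used-flag array: it hashes every piece once by its full content (content -> ordered list of source indices), precomputes the distinct piece lengths, and at each target position looks up the slice for each distinct length, taking the candidate with the smallest unused source index - provably the same piece A's first-match scan picks.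
import Mathlib
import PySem

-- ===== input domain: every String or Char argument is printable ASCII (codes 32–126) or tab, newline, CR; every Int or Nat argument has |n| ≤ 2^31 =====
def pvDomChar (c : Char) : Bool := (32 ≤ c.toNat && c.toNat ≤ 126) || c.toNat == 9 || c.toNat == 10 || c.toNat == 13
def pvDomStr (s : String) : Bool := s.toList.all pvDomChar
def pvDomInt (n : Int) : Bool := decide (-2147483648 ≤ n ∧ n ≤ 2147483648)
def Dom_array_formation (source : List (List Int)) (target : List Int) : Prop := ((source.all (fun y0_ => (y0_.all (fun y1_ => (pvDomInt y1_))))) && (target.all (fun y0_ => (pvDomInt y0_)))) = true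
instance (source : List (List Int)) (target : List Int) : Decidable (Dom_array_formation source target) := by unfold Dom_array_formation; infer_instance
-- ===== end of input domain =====

-- B replaces A's per-step rescan of `source` with used-flags by a whole-piece hash table:
-- each piece (by full content) maps to its source indices in order; at each position B looks
-- up, for every distinct piece length, the slice of the target and takes the matching piece
-- with the smallest unused source index — exactly the piece A's first-match scan picks.

-- ===== PORT A =====
-- inner `for i, piece in enumerate(source)` of A: first unused piece that starts with
-- target[index], fits, and matches target elementwise; returns its index and the piece.
def pvScanA (pairs : List (List Int × Nat)) (used : List Bool) (target : List Int)
    (index : Nat) : Option (Nat × List Int) :=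
  match pairs with
  | [] => none
  | (piece, i) :: rest =>
    if used.getD i false || piece == ([] : List Int)
        || !(piece.headI == PySem.List.pyGetD target (index : Int) 0) then
      pvScanA rest used target index
    else if decide (index + piece.length > target.length) then
      pvScanA rest used target index
    else if (PySem.List.enumerate piece).all
        (fun ov => PySem.List.pyGetD target ((index : Int) + ov.1) 0 == ov.2) then
      some (i, piece)
    else
      pvScanA rest used target index

theorem pvScanA_ne_nil {pairs : List (List Int × Nat)} {used : List Bool} {target : List Int}
    {index : Nat} {i : Nat} {piece : List Int}
    (h : pvScanA pairs used target index = some (i, piece)) : piece ≠ [] := by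
  induction pairs with
  | nil => simp [pvScanA] at h
  | cons hd tl ih =>
    obtain ⟨p, j⟩ := hd
    simp only [pvScanA] at h
    split at h
    · exact ih h
    · split at h
      · exact ih h
      · split at h
        · rename_i h1 _ _
          simp only [Option.some.injEq, Prod.mk.injEq] at h
          intro hnil
          exact h1 (by simp [h.2.trans hnil])
        · exact ih h

-- the `while index < len(target)` loop of A, over (used, index)
def pvLoopA (source : List (List Int)) (target : List Int) (used : List Bool)
    (index : Nat) : Bool :=
  if h : index < target.length then
    match hs : pvScanA source.zipIdx used target index with
    | none => false
    | some (i, piece) => pvLoopA source target (used.set i true) (index + piece.length)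
  else true
termination_by target.length - index
decreasing_by
  have hp : piece ≠ [] := pvScanA_ne_nil hs
  have : 0 < piece.length := List.length_pos_iff.mpr hp
  omega

def array_formation (source : List (List Int)) (target : List Int) : Bool :=
  pvLoopA source target (List.replicate source.length false) 0

-- ===== PORT B =====
-- `table.setdefault(tuple(piece), []).append(idx)` for each nonempty piece, in source order
def pvTable (source : List (List Int)) : PySem.Dict (List Int) (List Int) :=
  source.zipIdx.foldl
    (fun d x => if x.1.isEmpty then d else d.modify x.1 [] (fun l => l ++ [((x.2 : Nat) : Int)]))
    PySem.Dict.empty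

-- `sorted({len(p) for p in source if p})`
def pvLengths (source : List (List Int)) : List Int :=
  PySem.List.sorted
    (PySem.Set.ofList
      (source.filterMap (fun p => if p.isEmpty then none else some ((p.length : Int)))))
    (fun x => x) false

-- body of `for L in lengths`: the length guard, the table lookup, and the truthiness test;
-- returns the smallest unused index of a piece equal to target[i:i+L], if any
def pvCandAt (table : PySem.Dict (List Int) (List Int)) (target : List Int) (i : Nat)
    (L : Int) : Option Int :=
  if (i : Int) + L > (target.length : Int) then none
  else
    match table.get? (PySem.List.slice target (some (i : Int)) (some ((i : Int) + L))) with
    | some (c :: _) => some c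
    | _ => none

-- `if idxs and (best is None or idxs[0] < best[0]): best = (idxs[0], L)`
def pvStep (table : PySem.Dict (List Int) (List Int)) (target : List Int) (i : Nat)
    (best : Option (Int × Int)) (L : Int) : Option (Int × Int) :=
  match pvCandAt table target i L with
  | none => best
  | some c =>
    match best with
    | none => some (c, L)
    | some b => if c < b.1 then some (c, L) else best

-- the whole `for L in lengths` loop computing `best`
def pvBestB (table : PySem.Dict (List Int) (List Int)) (lengths : List Int)
    (target : List Int) (i : Nat) : Option (Int × Int) :=
  lengths.foldl (pvStep table target i) none

-- termination helpers for B's while loop (cited by pvLoopB's decreasing_by)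
theorem pvStep_or (table : PySem.Dict (List Int) (List Int)) (target : List Int) (i : Nat)
    (best : Option (Int × Int)) (L : Int) :
    pvStep table target i best L = best ∨ ∃ c, pvStep table target i best L = some (c, L) := by
  unfold pvStep
  cases pvCandAt table target i L with
  | none => exact Or.inl rfl
  | some c =>
    cases best with
    | none => exact Or.inr ⟨c, rfl⟩
    | some b =>
      by_cases h : c < b.1
      · exact Or.inr ⟨c, by simp [h]⟩
      · exact Or.inl (by simp [h])

theorem pvBestB_mem {table : PySem.Dict (List Int) (List Int)} {lengths : List Int}
    {target : List Int} {i : Nat} {c L : Int}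
    (h : pvBestB table lengths target i = some (c, L)) : L ∈ lengths := by
  suffices H : ∀ (ls : List Int) (acc : Option (Int × Int)),
      ls.foldl (pvStep table target i) acc = some (c, L) → acc = some (c, L) ∨ L ∈ ls by
    rcases H lengths none h with h1 | h1
    · cases h1
    · exact h1
  intro ls
  induction ls with
  | nil => intro acc hacc; exact Or.inl hacc
  | cons L' ls' ih =>
    intro acc hacc
    rcases ih (pvStep table target i acc L') hacc with h1 | h1
    · rcases pvStep_or table target i acc L' with h2 | ⟨c', h2⟩
      · exact Or.inl (h2 ▸ h1)
      · rw [h1] at h2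
        injection h2 with h2
        injection h2 with _ h3
        exact Or.inr (by rw [← h3]; exact List.mem_cons_self)
    · exact Or.inr (List.mem_cons_of_mem _ h1)

theorem pvLengths_pos (source : List (List Int)) : ∀ L ∈ pvLengths source, 0 < L := by
  intro L hL
  rw [pvLengths, PySem.List.mem_sorted] at hL
  have hL2 : L ∈ source.filterMap
      (fun p => if p.isEmpty then none else some ((p.length : Int))) :=
    (PySem.Set.mem_ofList _ _).mp hL
  obtain ⟨p, -, hp⟩ := List.mem_filterMap.mp hL2
  by_cases he : p.isEmpty
  · simp [he] at hp
  · rw [if_neg he] at hp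
    injection hp with hp
    have : p ≠ [] := by simpa using he
    have : 0 < p.length := List.length_pos_iff.mpr this
    omega

-- the `while i < n` loop of B (positivity of the lengths only serves termination)
def pvLoopB (target : List Int) (lengths : List Int) (hpos : ∀ L ∈ lengths, 0 < L)
    (table : PySem.Dict (List Int) (List Int)) (i : Nat) : Bool :=
  if h : i < target.length then
    match hb : pvBestB table lengths target i with
    | none => false
    | some (c, L) =>
      pvLoopB target lengths hpos
        (table.insert (PySem.List.slice target (some (i : Int)) (some ((i : Int) + L)))
          ((table.getD (PySem.List.slice target (some (i : Int)) (some ((i : Int) + L))) []).drop 1))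
        (i + L.toNat)
  else true
termination_by target.length - i
decreasing_by
  have hL : 0 < L := hpos L (pvBestB_mem hb)
  omega

def array_formation_alt (source : List (List Int)) (target : List Int) : Bool :=
  pvLoopB target (pvLengths source) (pvLengths_pos source) (pvTable source) 0

-- ===== PRECONDITION & SPEC =====
def Spec_array_formation (source : List (List Int)) (target : List Int) (out : Bool) : Prop := out = array_formation_alt source target
instance (source : List (List Int)) (target : List Int) (out : Bool) : Decidable (Spec_array_formation source target out) := by unfold Spec_array_formation; infer_instance

-- ===== CLAIM (what is proved, stated in full; the proofs are below) =====
def Claim_equal_array_formation : Prop := ∀ (source : List (List Int)) (target : List Int), Dom_array_formation source target → Spec_array_formation source target (array_formation source target)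

-- ===== LEMMAS AND PROOFS =====

-- the (piece, index) pairs that A would accept at position i: unused, nonempty,
-- and equal to the target slice starting at i
def pvMatches (pairs : List (List Int × Nat)) (used : List Bool) (target : List Int)
    (i : Nat) : List (List Int × Nat) :=
  pairs.filter (fun x => (used.getD x.2 false == false) && (!x.1.isEmpty)
    && ((target.drop i).take x.1.length == x.1))

-- the index list B's table stores under `key`: unused pieces equal to key, in source order
def pvIdxs (pairs : List (List Int × Nat)) (used : List Bool) (key : List Int) : List Int :=
  (pairs.filter (fun x => (used.getD x.2 false == false) && (!x.1.isEmpty) && (x.1 == key))).map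
    (fun x => ((x.2 : Nat) : Int))


-- closing Bool predicates from their components
theorem pvPredM_true {used : List Bool} {target : List Int} {i : Nat} {x : List Int × Nat}
    (hu : used.getD x.2 false = false) (hne : x.1 ≠ [])
    (ht : (target.drop i).take x.1.length = x.1) :
    ((used.getD x.2 false == false) && (!x.1.isEmpty)
      && ((target.drop i).take x.1.length == x.1)) = true := by
  rw [hu, ht]
  simp [hne]

theorem pvPredF_true {used : List Bool} {x : List Int × Nat} {key : List Int}
    (hu : used.getD x.2 false = false) (hne : x.1 ≠ []) (hk : x.1 = key) :
    ((used.getD x.2 false == false) && (!x.1.isEmpty) && (x.1 == key)) = true := by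
  rw [hu, hk]
  have hk' : key ≠ [] := hk ▸ hne
  simp [hk']

-- indices in zipIdx are strictly increasing / distinct
theorem pvZipIdx_pairwise (l : List (List Int)) :
    l.zipIdx.Pairwise (fun a b => a.2 < b.2) := by
  have h : (l.zipIdx.map Prod.snd).Pairwise (· < ·) := by
    rw [List.zipIdx_map_snd]
    exact List.pairwise_lt_range' ..
  exact List.pairwise_map.mp h

theorem pvZipIdx_nodup (l : List (List Int)) : (l.zipIdx.map Prod.snd).Nodup := by
  rw [List.zipIdx_map_snd]
  exact List.nodup_range'

-- shift of enumerate's start index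
theorem pvEnum_shift {α : Type} (p : List α) (s t : Int) :
    PySem.List.enumerate p (s + t) =
      (PySem.List.enumerate p t).map (fun ov => (ov.1 + s, ov.2)) := by
  induction p generalizing t with
  | nil => simp [PySem.List.enumerate_nil]
  | cons x xs ih =>
    rw [PySem.List.enumerate_cons, PySem.List.enumerate_cons]
    have h1 : s + t + 1 = s + (t + 1) := by ring
    rw [h1, ih (t + 1), List.map_cons]
    simp [Int.add_comm s t]

-- the whole-slice comparison equals A's fit test plus elementwise test
theorem pvTake_drop_beq (p : List Int) : ∀ (index : Nat) (target : List Int),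
    index + p.length ≤ target.length →
    (((target.drop index).take p.length) == p)
      = (PySem.List.enumerate p).all
          (fun ov => PySem.List.pyGetD target ((index : Int) + ov.1) 0 == ov.2) := by
  induction p with
  | nil => intro index target h; simp [PySem.List.enumerate_nil]
  | cons a p' ih =>
    intro index target h
    have hidx : index < target.length := by
      simp only [List.length_cons] at h; omega
    rw [List.drop_eq_getElem_cons hidx]
    simp only [List.length_cons, List.take_succ_cons, List.cons_beq_cons,
      PySem.List.enumerate_cons, List.all_cons]
    have hhead : (PySem.List.pyGetD target ((index : Int) + 0) 0 == a)
        = (target[index] == a) := by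
      rw [show ((index : Int) + 0) = ((index : Nat) : Int) by ring,
        PySem.List.pyGetD_natCast]
      congr 1
      simp [List.getD, List.getElem?_eq_getElem hidx]
    have htail : (PySem.List.enumerate p' 1).all
          (fun ov => PySem.List.pyGetD target ((index : Int) + ov.1) 0 == ov.2)
        = (PySem.List.enumerate p').all
          (fun ov => PySem.List.pyGetD target (((index + 1 : Nat) : Int) + ov.1) 0 == ov.2) := by
      rw [show (1 : Int) = 1 + 0 by ring, pvEnum_shift p' 1 0, List.all_map]
      refine List.all_congr rfl (fun ov => ?_)
      have h2 : (index : Int) + (ov.1 + 1) = ((index + 1 : Nat) : Int) + ov.1 := by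
        push_cast; ring
      show (PySem.List.pyGetD target ((index : Int) + (ov.1 + 1)) 0 == ov.2) = _
      rw [h2]
    rw [show ((0 : Int) + 1) = 1 from by norm_num] at *
    rw [hhead, htail, ih (index + 1) target (by simp only [List.length_cons] at h; omega)]

-- A's scan returns the FIRST element of the match list
theorem pvScanA_char (target : List Int) (i : Nat) (hi : i < target.length)
    (pairs : List (List Int × Nat)) (used : List Bool) :
    pvScanA pairs used target i
      = (pvMatches pairs used target i).head?.map (fun x => (x.2, x.1)) := by
  induction pairs with
  | nil => rfl
  | cons hd tl ih =>
    obtain ⟨p, j⟩ := hd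
    by_cases hm : ((used.getD j false == false) && (!p.isEmpty)
        && ((target.drop i).take p.length == p)) = true
    · obtain ⟨⟨hu, hne⟩, htake⟩ :
          ((used.getD j false = false) ∧ p ≠ []) ∧ (target.drop i).take p.length = p := by
        simpa [List.isEmpty_eq_false_iff] using hm
      obtain ⟨a, p', rfl⟩ : ∃ a p', p = a :: p' := by
        cases p with
        | nil => exact absurd rfl hne
        | cons a p' => exact ⟨a, p', rfl⟩
      have hfit : i + (a :: p').length ≤ target.length := by
        have := congrArg List.length htake
        simp only [List.length_take, List.length_drop] at this
        omega
      have hdrop : 0 < (target.drop i).length := by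
        simp only [List.length_drop]; omega
      obtain ⟨b, rest, hbr⟩ : ∃ b rest, target.drop i = b :: rest := by
        cases hd : target.drop i with
        | nil => rw [hd] at hdrop; simp at hdrop
        | cons b rest => exact ⟨b, rest, rfl⟩
      have hb : b = target[i] := by
        have h0 : (target.drop i)[0]? = target[i + 0]? := List.getElem?_drop ..
        rw [hbr, List.getElem?_cons_zero,
          List.getElem?_eq_getElem (by omega : i + 0 < target.length)] at h0
        injection h0 with h0
      have hab : a = b := by
        rw [hbr] at htake
        simp only [List.length_cons, List.take_succ_cons, List.cons.injEq] at htake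
        exact htake.1.symm
      have hhead : ((a :: p').headI == PySem.List.pyGetD target (i : Int) 0) = true := by
        rw [PySem.List.pyGetD_natCast]
        simp [List.headI, hab, hb, List.getD, List.getElem?_eq_getElem hi]
      have hall : ((PySem.List.enumerate (a :: p')).all
          (fun ov => PySem.List.pyGetD target ((i : Int) + ov.1) 0 == ov.2)) = true := by
        rw [← pvTake_drop_beq _ _ _ hfit, htake]
        exact beq_self_eq_true _
      have hbeq : ((a :: p') == ([] : List Int)) = false :=
        beq_eq_false_iff_ne.mpr (List.cons_ne_nil a p')
      rw [pvScanA]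
      rw [if_neg (by rw [hu, hbeq, hhead]; simp),
        if_neg (by simp only [decide_eq_true_eq]; omega), if_pos hall]
      have hm' := hm
      rw [pvMatches, List.filter_cons, if_pos hm']
      rfl
    · have hM : pvMatches ((p, j) :: tl) used target i = pvMatches tl used target i := by
        rw [pvMatches, List.filter_cons, if_neg hm]
        rfl
      rw [hM, ← ih, pvScanA]
      by_cases g1 : (used.getD j false || p == ([] : List Int)
          || !(p.headI == PySem.List.pyGetD target (i : Int) 0)) = true
      · rw [if_pos g1]
      · rw [if_neg g1]
        obtain ⟨hu, hne⟩ : used.getD j false = false ∧ p ≠ [] := by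
          simp only [Bool.or_eq_true, Bool.not_eq_true', beq_iff_eq, not_or,
            Bool.not_eq_true] at g1
          exact ⟨g1.1.1, by simpa using g1.1.2⟩
        by_cases g2 : decide (i + p.length > target.length) = true
        · rw [if_pos g2]
        · rw [if_neg g2]
          have hfit : i + p.length ≤ target.length := by
            simp only [decide_eq_true_eq] at g2; omega
          have g3 : ¬ ((PySem.List.enumerate p).all
              (fun ov => PySem.List.pyGetD target ((i : Int) + ov.1) 0 == ov.2) = true) := by
            intro g3
            rw [← pvTake_drop_beq _ _ _ hfit] at g3
            exact hm (pvPredM_true (x := (p, j)) hu hne (by simpa using g3))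
          rw [if_neg g3]

-- (position-wise minimum) the first match dominates every later one
theorem pvMatches_head_min (pairs : List (List Int × Nat)) (used : List Bool)
    (target : List Int) (i : Nat) (p0 : List Int) (j0 : Nat) (mrest : List (List Int × Nat))
    (hpw : pairs.Pairwise (fun a b => a.2 < b.2))
    (hM : pvMatches pairs used target i = (p0, j0) :: mrest) :
    ∀ x ∈ pvMatches pairs used target i, j0 ≤ x.2 := by
  have hpwM : (pvMatches pairs used target i).Pairwise (fun a b => a.2 < b.2) :=
    hpw.filter _
  rw [hM] at hpwM ⊢
  intro x hx
  rcases List.mem_cons.mp hx with h1 | h1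
  · rw [h1]
  · have := (List.pairwise_cons.mp hpwM).1 x h1
    omega

-- B's stored index list for the first match's content starts with its index
theorem pvIdxs_head_of_matches (pairs : List (List Int × Nat)) (used : List Bool)
    (target : List Int) (i : Nat) (p0 : List Int) (j0 : Nat) (mrest : List (List Int × Nat))
    (hpw : pairs.Pairwise (fun a b => a.2 < b.2))
    (hM : pvMatches pairs used target i = (p0, j0) :: mrest) :
    ∃ cs, pvIdxs pairs used p0 = ((j0 : Nat) : Int) :: cs ∧ ∀ c ∈ cs, ((j0 : Nat) : Int) < c := by
  have hheadM : (p0, j0) ∈ pvMatches pairs used target i := by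
    rw [hM]; exact List.mem_cons_self
  obtain ⟨hmem0, hpred0⟩ := List.mem_filter.mp hheadM
  obtain ⟨⟨hu0, hne0⟩, htake0⟩ :
      ((used.getD j0 false = false) ∧ p0 ≠ []) ∧ (target.drop i).take p0.length = p0 := by
    simpa [List.isEmpty_eq_false_iff] using hpred0
  have hsub : ∀ x ∈ pairs.filter (fun x => (used.getD x.2 false == false) && (!x.1.isEmpty)
      && (x.1 == p0)), x ∈ pvMatches pairs used target i := by
    intro x hx
    obtain ⟨hxm, hxp⟩ := List.mem_filter.mp hx
    obtain ⟨⟨hxu, hxne⟩, hxk⟩ :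
        ((used.getD x.2 false = false) ∧ x.1 ≠ []) ∧ x.1 = p0 := by
      simpa [List.isEmpty_eq_false_iff] using hxp
    exact List.mem_filter.mpr ⟨hxm,
      pvPredM_true (x := x) hxu hxne (by rw [hxk]; exact htake0)⟩
  have hmin := pvMatches_head_min pairs used target i p0 j0 mrest hpw hM
  have hpwF : (pairs.filter (fun x => (used.getD x.2 false == false) && (!x.1.isEmpty)
      && (x.1 == p0))).Pairwise (fun a b => a.2 < b.2) := hpw.filter _
  have hmemF : (p0, j0) ∈ pairs.filter (fun x => (used.getD x.2 false == false)
      && (!x.1.isEmpty) && (x.1 == p0)) := by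
    exact List.mem_filter.mpr ⟨hmem0, pvPredF_true hu0 hne0 rfl⟩
  rcases hF : pairs.filter (fun x => (used.getD x.2 false == false) && (!x.1.isEmpty)
      && (x.1 == p0)) with _ | ⟨y, ys⟩
  · rw [hF] at hmemF; cases hmemF
  · have hy : y = (p0, j0) := by
      rw [hF] at hmemF hpwF
      rcases List.mem_cons.mp hmemF with h1 | h1
      · exact h1.symm
      · have hlt : y.2 < j0 := by
          have := (List.pairwise_cons.mp hpwF).1 _ h1
          simpa using this
        have hge : j0 ≤ y.2 := hmin y (hsub y (by rw [hF]; exact List.mem_cons_self))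
        omega
    refine ⟨ys.map (fun x => ((x.2 : Nat) : Int)), ?_, ?_⟩
    · rw [pvIdxs, hF, hy, List.map_cons]
    · intro c hc
      obtain ⟨x, hx, hxc⟩ := List.mem_map.mp hc
      have : j0 < x.2 := by
        rw [hF] at hpwF
        have := (List.pairwise_cons.mp hpwF).1 x hx
        rw [hy] at this
        simpa using this
      rw [← hxc]
      exact_mod_cast this

-- every candidate B's lookup produces comes from a genuine match
theorem pvCandAt_sound (source : List (List Int)) (target : List Int) (used : List Bool)
    (table : PySem.Dict (List Int) (List Int)) (i : Nat) (L : Int)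
    (INV : ∀ key, table.getD key [] = pvIdxs source.zipIdx used key)
    (hLpos : 0 < L) {c : Int}
    (hc : pvCandAt table target i L = some c) :
    ∃ x ∈ pvMatches source.zipIdx used target i,
      ((x.2 : Nat) : Int) = c ∧ ((x.1.length : Nat) : Int) = L := by
  rw [pvCandAt] at hc
  split at hc
  · cases hc
  · rename_i hguard
    have hfits : (i : Int) + L ≤ (target.length : Int) := by omega
    have ht2 : ((i : Int) + L).toNat = i + L.toNat := by omega
    have ht1 : ((i : Nat) : Int).toNat = i := by omega
    have hkey : PySem.List.slice target (some (i : Int)) (some ((i : Int) + L))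
        = (target.drop i).take L.toNat := by
      rw [PySem.List.slice_toNat _ (by omega) (by omega), ht2, ht1, Nat.add_sub_cancel_left]
    rw [hkey] at hc
    rcases hget : table.get? ((target.drop i).take L.toNat) with _ | v
    · rw [hget] at hc; cases hc
    · rw [hget] at hc
      rcases v with _ | ⟨c', cs⟩
      · cases hc
      · have hc2 : c' = c := by injection hc
        have hgd : table.getD ((target.drop i).take L.toNat) [] = c' :: cs :=
          PySem.Dict.getD_of_get?_eq_some _ _ hget
        rw [INV] at hgd
        rcases hFl : source.zipIdx.filter (fun x => (used.getD x.2 false == false)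
            && (!x.1.isEmpty) && (x.1 == (target.drop i).take L.toNat)) with _ | ⟨x, xs⟩
        · rw [pvIdxs, hFl] at hgd; cases hgd
        · have hxc : ((x.2 : Nat) : Int) = c' := by
            rw [pvIdxs, hFl, List.map_cons] at hgd
            injection hgd with h1 _
          obtain ⟨hxm, hxp⟩ := List.mem_filter.mp
            (show x ∈ _ by rw [hFl]; exact List.mem_cons_self)
          obtain ⟨⟨hxu, hxne⟩, hxk⟩ :
              ((used.getD x.2 false = false) ∧ x.1 ≠ []) ∧
                x.1 = (target.drop i).take L.toNat := by
            simpa [List.isEmpty_eq_false_iff] using hxp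
          have hfitn : i + L.toNat ≤ target.length := by omega
          have hlenk : x.1.length = L.toNat := by
            rw [hxk]
            simp only [List.length_take, List.length_drop]
            omega
          refine ⟨x, ?_, hc2 ▸ hxc, ?_⟩
          · exact List.mem_filter.mpr ⟨hxm,
              pvPredM_true (x := x) hxu hxne (by rw [hlenk]; exact hxk.symm)⟩
          · rw [hlenk]
            omega

-- at the first match's length, B's lookup yields exactly the first match's index
theorem pvCandAt_head (source : List (List Int)) (target : List Int) (used : List Bool)
    (table : PySem.Dict (List Int) (List Int)) (i : Nat) (p0 : List Int) (j0 : Nat)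
    (mrest : List (List Int × Nat))
    (INV : ∀ key, table.getD key [] = pvIdxs source.zipIdx used key)
    (hM : pvMatches source.zipIdx used target i = (p0, j0) :: mrest) :
    pvCandAt table target i ((p0.length : Nat) : Int) = some ((j0 : Nat) : Int) := by
  have hheadM : (p0, j0) ∈ pvMatches source.zipIdx used target i := by
    rw [hM]; exact List.mem_cons_self
  obtain ⟨hmem0, hpred0⟩ := List.mem_filter.mp hheadM
  obtain ⟨⟨hu0, hne0⟩, htake0⟩ :
      ((used.getD j0 false = false) ∧ p0 ≠ []) ∧ (target.drop i).take p0.length = p0 := by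
    simpa [List.isEmpty_eq_false_iff] using hpred0
  have hp0 : 0 < p0.length := List.length_pos_iff.mpr hne0
  have hfit : i + p0.length ≤ target.length := by
    have := congrArg List.length htake0
    simp only [List.length_take, List.length_drop] at this
    omega
  obtain ⟨cs, hids, -⟩ :=
    pvIdxs_head_of_matches source.zipIdx used target i p0 j0 mrest
      (pvZipIdx_pairwise source) hM
  have hkey : PySem.List.slice target (some (i : Int))
      (some ((i : Int) + ((p0.length : Nat) : Int))) = p0 := by
    rw [PySem.List.slice_natCast_add, htake0]
  have hgd : table.getD p0 [] = ((j0 : Nat) : Int) :: cs := by rw [INV, hids]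
  have hget : table.get? p0 = some (((j0 : Nat) : Int) :: cs) := by
    rcases hg : table.get? p0 with _ | v
    · exact absurd ((PySem.Dict.getD_of_get?_eq_none _ _ hg).symm.trans hgd) (by simp)
    · rw [(PySem.Dict.getD_of_get?_eq_some _ _ hg)] at hgd
      rw [hgd]
  rw [pvCandAt, if_neg (by simp only [gt_iff_lt, not_lt]; exact_mod_cast hfit), hkey, hget]

-- the for-loop over lengths keeps `best` when no length yields a candidate
theorem pvFold_id (table : PySem.Dict (List Int) (List Int)) (target : List Int) (i : Nat) :
    ∀ (ls : List Int) (acc : Option (Int × Int)),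
    (∀ L ∈ ls, pvCandAt table target i L = none) →
    ls.foldl (pvStep table target i) acc = acc := by
  intro ls
  induction ls with
  | nil => intro acc h; rfl
  | cons L ls' ih =>
    intro acc h
    rw [List.foldl_cons]
    have hstep : pvStep table target i acc L = acc := by
      rw [pvStep, h L List.mem_cons_self]
    rw [hstep]
    exact ih acc (fun L' hL' => h L' (List.mem_cons_of_mem _ hL'))

-- the for-loop over lengths computes the unique minimal candidate
theorem pvFold_min (table : PySem.Dict (List Int) (List Int)) (target : List Int) (i : Nat)
    (c0 L0 : Int) :
    ∀ (ls : List Int) (acc : Option (Int × Int)),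
    (∀ L ∈ ls, ∀ c, pvCandAt table target i L = some c →
      c0 ≤ c ∧ (c = c0 → L = L0)) →
    ((L0 ∈ ls ∧ pvCandAt table target i L0 = some c0 ∧
        (acc = none ∨ ∃ b, acc = some b ∧ c0 < b.1))
      ∨ acc = some (c0, L0)) →
    ls.foldl (pvStep table target i) acc = some (c0, L0) := by
  intro ls
  induction ls with
  | nil =>
    intro acc hmin hmode
    rcases hmode with ⟨h1, -, -⟩ | h2
    · cases h1
    · rw [List.foldl_nil, h2]
  | cons L ls' ih =>
    intro acc hmin hmode
    rw [List.foldl_cons]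
    have hmin' : ∀ L' ∈ ls', ∀ c, pvCandAt table target i L' = some c →
        c0 ≤ c ∧ (c = c0 → L' = L0) :=
      fun L' hL' => hmin L' (List.mem_cons_of_mem _ hL')
    rcases hc : pvCandAt table target i L with _ | c
    · have hstep : pvStep table target i acc L = acc := by rw [pvStep, hc]
      rw [hstep]
      refine ih acc hmin' ?_
      rcases hmode with ⟨h1, h2, h3⟩ | h2
      · refine Or.inl ⟨?_, h2, h3⟩
        rcases List.mem_cons.mp h1 with he | he
        · rw [← he] at hc; rw [h2] at hc; cases hc
        · exact he
      · exact Or.inr h2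
    · obtain ⟨hle, heq⟩ := hmin L List.mem_cons_self c hc
      have hL0ls' : pvCandAt table target i L0 = some c0 → L0 ∈ L :: ls' → c ≠ c0 → L0 ∈ ls' := by
        intro hc0 hmem hne
        rcases List.mem_cons.mp hmem with he | he
        · rw [← he] at hc; rw [hc0] at hc
          injection hc with h
          exact absurd h.symm hne
        · exact he
      rcases hmode with ⟨h1, h2, h3⟩ | hacc
      · rcases h3 with h3 | ⟨b, hb, hbl⟩
        · subst h3
          have hstep : pvStep table target i none L = some (c, L) := by rw [pvStep, hc]
          rw [hstep]
          by_cases hcc : c = c0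
          · subst hcc
            rw [heq rfl]
            exact ih _ hmin' (Or.inr rfl)
          · refine ih _ hmin' (Or.inl ⟨hL0ls' h2 h1 hcc, h2, Or.inr ⟨(c, L), rfl, ?_⟩⟩)
            exact lt_of_le_of_ne hle (Ne.symm hcc)
        · subst hb
          by_cases hcb : c < b.1
          · have hstep : pvStep table target i (some b) L = some (c, L) := by
              rw [pvStep, hc]
              simp [hcb]
            rw [hstep]
            by_cases hcc : c = c0
            · subst hcc
              rw [heq rfl]
              exact ih _ hmin' (Or.inr rfl)
            · refine ih _ hmin' (Or.inl ⟨hL0ls' h2 h1 hcc, h2, Or.inr ⟨(c, L), rfl, ?_⟩⟩)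
              exact lt_of_le_of_ne hle (Ne.symm hcc)
          · have hstep : pvStep table target i (some b) L = some b := by
              rw [pvStep, hc]
              simp [hcb]
            rw [hstep]
            have hcc : c ≠ c0 := by
              intro hcc
              exact hcb (by rw [hcc]; exact hbl)
            exact ih _ hmin' (Or.inl ⟨hL0ls' h2 h1 hcc, h2, Or.inr ⟨b, rfl, hbl⟩⟩)
      · subst hacc
        have hncb : ¬ c < c0 := by omega
        have hstep : pvStep table target i (some (c0, L0)) L = some (c0, L0) := by
          rw [pvStep, hc]
          simp [hncb]
        rw [hstep]
        exact ih _ hmin' (Or.inr rfl)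

-- B's for-loop over the lengths selects exactly the first match of A's scan
theorem pvBestB_char (source : List (List Int)) (target : List Int) (lengths : List Int)
    (used : List Bool) (table : PySem.Dict (List Int) (List Int)) (i : Nat)
    (INV : ∀ key, table.getD key [] = pvIdxs source.zipIdx used key)
    (Hmem : ∀ p ∈ source, p ≠ [] → ((p.length : Nat) : Int) ∈ lengths)
    (Hpos : ∀ L ∈ lengths, 0 < L) :
    pvBestB table lengths target i
      = (pvMatches source.zipIdx used target i).head?.map
          (fun x => (((x.2 : Nat) : Int), ((x.1.length : Nat) : Int))) := by
  rcases hM : pvMatches source.zipIdx used target i with _ | ⟨⟨p0, j0⟩, mrest⟩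
  · have hnone : ∀ L ∈ lengths, pvCandAt table target i L = none := by
      intro L hL
      rcases hc : pvCandAt table target i L with _ | c
      · rfl
      · obtain ⟨x, hx, -, -⟩ := pvCandAt_sound source target used table i L INV (Hpos L hL) hc
        rw [hM] at hx
        cases hx
    rw [pvBestB, pvFold_id table target i lengths none hnone]
    rfl
  · have hheadM : (p0, j0) ∈ pvMatches source.zipIdx used target i := by
      rw [hM]; exact List.mem_cons_self
    obtain ⟨hmem0, hpred0⟩ := List.mem_filter.mp hheadM
    have hne0 : p0 ≠ [] := by
      simp only [Bool.and_eq_true, Bool.not_eq_true', List.isEmpty_eq_false_iff] at hpred0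
      exact hpred0.1.2
    have hp0src : p0 ∈ source := by
      obtain ⟨-, hlt, heq⟩ := List.mem_zipIdx hmem0
      rw [heq]
      exact List.getElem_mem _
    have hL0 : ((p0.length : Nat) : Int) ∈ lengths := Hmem p0 hp0src hne0
    have hcand0 := pvCandAt_head source target used table i p0 j0 mrest INV hM
    have hmin : ∀ L ∈ lengths, ∀ c, pvCandAt table target i L = some c →
        ((j0 : Nat) : Int) ≤ c ∧ (c = ((j0 : Nat) : Int) → L = ((p0.length : Nat) : Int)) := by
      intro L hL c hc
      obtain ⟨x, hx, hxc, hxL⟩ :=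
        pvCandAt_sound source target used table i L INV (Hpos L hL) hc
      have hx2 : j0 ≤ x.2 :=
        pvMatches_head_min source.zipIdx used target i p0 j0 mrest
          (pvZipIdx_pairwise source) hM x hx
      constructor
      · rw [← hxc]; exact_mod_cast hx2
      · intro hcc
        have hx2e : x.2 = j0 := by
          rw [← hxc] at hcc
          exact_mod_cast hcc
        have hxmem : x ∈ source.zipIdx := (List.mem_filter.mp hx).1
        have hxeq : x = (p0, j0) :=
          List.inj_on_of_nodup_map (pvZipIdx_nodup source) hxmem hmem0 hx2e
        rw [← hxL, hxeq]
    rw [pvBestB, pvFold_min table target i ((j0 : Nat) : Int) ((p0.length : Nat) : Int)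
      lengths none hmin (Or.inl ⟨hL0, hcand0, Or.inl rfl⟩)]
    rfl

-- marking index j0 used deletes exactly the value j0 from every stored index list
theorem pvIdxs_set (pairs : List (List Int × Nat)) (used : List Bool) (j0 : Nat)
    (hlt : j0 < used.length) (key : List Int) :
    pvIdxs pairs (used.set j0 true) key
      = (pvIdxs pairs used key).filter (fun c => !(c == ((j0 : Nat) : Int))) := by
  induction pairs with
  | nil => rfl
  | cons x tl ih =>
    by_cases hx : x.2 = j0
    · have hnew : (used.set j0 true).getD x.2 false = true := by
        rw [hx]
        simp [List.getD, List.getElem?_set_self hlt]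
      have hLHS : pvIdxs (x :: tl) (used.set j0 true) key
          = pvIdxs tl (used.set j0 true) key := by
        rw [pvIdxs, List.filter_cons, if_neg (by rw [hnew]; simp)]
        rfl
      rw [hLHS, ih]
      by_cases hold : ((used.getD x.2 false == false) && (!x.1.isEmpty) && (x.1 == key)) = true
      · have hR : pvIdxs (x :: tl) used key = ((x.2 : Nat) : Int) :: pvIdxs tl used key := by
          rw [pvIdxs, List.filter_cons, if_pos hold]
          rfl
        rw [hR, List.filter_cons]
        simp [hx]
      · have hR : pvIdxs (x :: tl) used key = pvIdxs tl used key := by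
          rw [pvIdxs, List.filter_cons, if_neg hold]
          rfl
        rw [hR]
    · have hnew : (used.set j0 true).getD x.2 false = used.getD x.2 false := by
        simp [List.getD, List.getElem?_set_ne (fun he => hx he.symm)]
      by_cases hold : ((used.getD x.2 false == false) && (!x.1.isEmpty) && (x.1 == key)) = true
      · have hLHS : pvIdxs (x :: tl) (used.set j0 true) key
            = ((x.2 : Nat) : Int) :: pvIdxs tl (used.set j0 true) key := by
          rw [pvIdxs, List.filter_cons, if_pos (by rw [hnew]; exact hold)]
          rfl
        have hR : pvIdxs (x :: tl) used key = ((x.2 : Nat) : Int) :: pvIdxs tl used key := by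
          rw [pvIdxs, List.filter_cons, if_pos hold]
          rfl
        rw [hLHS, hR, ih, List.filter_cons, if_pos (by simp; exact_mod_cast hx)]
      · have hLHS : pvIdxs (x :: tl) (used.set j0 true) key
            = pvIdxs tl (used.set j0 true) key := by
          rw [pvIdxs, List.filter_cons, if_neg (by rw [hnew]; exact hold)]
          rfl
        have hR : pvIdxs (x :: tl) used key = pvIdxs tl used key := by
          rw [pvIdxs, List.filter_cons, if_neg hold]
          rfl
        rw [hLHS, hR, ih]

-- the initially built table stores, per content, the indices of equal pieces in order
theorem pvTable_getD (source : List (List Int)) (key : List Int) :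
    (pvTable source).getD key []
      = pvIdxs source.zipIdx (List.replicate source.length false) key := by
  have hfold : ∀ (l : List (List Int × Nat)) (d : PySem.Dict (List Int) (List Int)),
      l.foldl (fun d x => if x.1.isEmpty then d
        else d.modify x.1 [] (fun s => s ++ [((x.2 : Nat) : Int)])) d
      = (l.filterMap (fun x => if x.1.isEmpty then none
          else some (x.1, ((x.2 : Nat) : Int)))).foldl
          (fun d q => d.modify q.1 [] (· ++ [q.2])) d := by
    intro l
    induction l with
    | nil => intro d; rfl
    | cons x tl ih =>
      intro d
      rw [List.foldl_cons, List.filterMap_cons]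
      by_cases hx : x.1.isEmpty
      · rw [if_pos hx, if_pos hx]
        exact ih d
      · rw [if_neg hx, if_neg hx]
        exact ih _
  have hrep : ∀ j : Nat, (List.replicate source.length false).getD j false = false := by
    intro j
    simp only [List.getD, List.getElem?_replicate]
    split <;> rfl
  rw [pvTable, hfold, PySem.Dict.getD_foldl_modify_append, PySem.Dict.getD_empty,
    List.nil_append]
  suffices H : ∀ (l : List (List Int × Nat)),
      ((l.filterMap (fun x => if x.1.isEmpty then none
        else some (x.1, ((x.2 : Nat) : Int)))).filter (fun q => q.1 == key)).map (·.2)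
      = pvIdxs l (List.replicate source.length false) key from H _
  intro l
  induction l with
  | nil => rfl
  | cons x tl ih =>
    by_cases hx : x.1.isEmpty
    · have hR : pvIdxs (x :: tl) (List.replicate source.length false) key
          = pvIdxs tl (List.replicate source.length false) key := by
        rw [pvIdxs, List.filter_cons, if_neg (by simp [hx])]
        rfl
      rw [List.filterMap_cons, if_pos hx, hR]
      exact ih
    · have hx' : x.1 ≠ [] := by
        cases he : x.1.isEmpty
        · simpa [List.isEmpty_eq_false_iff] using he
        · exact absurd he hx
      rw [List.filterMap_cons, if_neg hx, List.filter_cons]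
      by_cases hk : (x.1 == key) = true
      · have hR : pvIdxs (x :: tl) (List.replicate source.length false) key
            = ((x.2 : Nat) : Int) :: pvIdxs tl (List.replicate source.length false) key := by
          rw [pvIdxs, List.filter_cons,
            if_pos (by rw [hrep x.2, hk]; simp [List.isEmpty_eq_false_iff, hx'])]
          rfl
        rw [hR, if_pos (show ((x.1, ((x.2 : Nat) : Int)).1 == key) = true from hk),
          List.map_cons]
        exact congrArg _ ih
      · have hk' : (x.1 == key) = false := by simpa using hk
        have hR : pvIdxs (x :: tl) (List.replicate source.length false) key
            = pvIdxs tl (List.replicate source.length false) key := by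
          rw [pvIdxs, List.filter_cons, if_neg (by rw [hk']; simp)]
          rfl
        rw [hR, if_neg (show ¬ ((x.1, ((x.2 : Nat) : Int)).1 == key) = true from hk)]
        exact ih

-- bisimulation of the two while loops
theorem pvLoops_eq (source : List (List Int)) (target : List Int) (lengths : List Int)
    (Hmem : ∀ p ∈ source, p ≠ [] → ((p.length : Nat) : Int) ∈ lengths)
    (hpos : ∀ L ∈ lengths, 0 < L) :
    ∀ (N i : Nat) (used : List Bool) (table : PySem.Dict (List Int) (List Int)),
    target.length - i ≤ N →
    used.length = source.length →
    (∀ key, table.getD key [] = pvIdxs source.zipIdx used key) →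
    pvLoopA source target used i = pvLoopB target lengths hpos table i := by
  intro N
  induction N with
  | zero =>
    intro i used table hN hlen INV
    have h1 : ¬ i < target.length := by omega
    rw [pvLoopA, pvLoopB]
    simp [h1]
  | succ N ih =>
    intro i used table hN hlen INV
    by_cases h1 : i < target.length
    · have hA := pvScanA_char target i h1 source.zipIdx used
      have hB := pvBestB_char source target lengths used table i INV Hmem hpos
      rcases hM : pvMatches source.zipIdx used target i with _ | ⟨⟨p0, j0⟩, mrest⟩
      · rw [hM] at hA hB
        rw [pvLoopA, pvLoopB, dif_pos h1, dif_pos h1]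
        split
        · split
          · rfl
          · rename_i heqB
            rw [hB] at heqB
            cases heqB
        · rename_i heqA
          rw [hA] at heqA
          cases heqA
      · rw [hM] at hA hB
        simp only [List.head?_cons, Option.map_some] at hA hB
        -- facts about the head match
        have hheadM : (p0, j0) ∈ pvMatches source.zipIdx used target i := by
          rw [hM]; exact List.mem_cons_self
        obtain ⟨hmem0, hpred0⟩ := List.mem_filter.mp hheadM
        obtain ⟨⟨hu0, hne0⟩, htake0⟩ :
            ((used.getD j0 false = false) ∧ p0 ≠ []) ∧
              (target.drop i).take p0.length = p0 := by
          simpa [List.isEmpty_eq_false_iff] using hpred0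
        have hj0lt : j0 < source.length := by
          obtain ⟨-, hlt, -⟩ := List.mem_zipIdx hmem0
          simpa using hlt
        have hkey : PySem.List.slice target (some (i : Int))
            (some ((i : Int) + ((p0.length : Nat) : Int))) = p0 := by
          rw [PySem.List.slice_natCast_add, htake0]
        obtain ⟨cs, hids, hcs⟩ :=
          pvIdxs_head_of_matches source.zipIdx used target i p0 j0 mrest
            (pvZipIdx_pairwise source) hM
        rw [pvLoopA, pvLoopB, dif_pos h1, dif_pos h1]
        split
        · rename_i heqA
          rw [hA] at heqA
          cases heqA
        · rename_i iA pieceA heqA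
          rw [hA] at heqA
          injection heqA with heqA
          injection heqA with hi1 hp1
          subst hi1
          subst hp1
          split
          · rename_i heqB
            rw [hB] at heqB
            cases heqB
          · rename_i cB LB heqB
            rw [hB] at heqB
            injection heqB with heqB
            injection heqB with hc1 hL1
            subst hc1
            subst hL1
            rw [hkey]
            have hadv : i + ((p0.length : Nat) : Int).toNat = i + p0.length := by simp
            rw [hadv]
            apply ih (i + p0.length) (used.set j0 true) _ (by
                have : 0 < p0.length := List.length_pos_iff.mpr hne0
                omega)
              (by rw [List.length_set]; exact hlen)
            intro key
            rw [PySem.Dict.getD_insert,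
              pvIdxs_set source.zipIdx used j0 (by omega) key]
            by_cases hkp : key = p0
            · subst hkp
              rw [if_pos rfl, INV, hids]
              rw [List.filter_cons, if_neg (by simp), List.drop_one, List.tail_cons]
              rw [List.filter_eq_self.mpr (fun c hc => by
                have := hcs c hc
                simp only [Bool.not_eq_eq_eq_not, Bool.not_true, beq_eq_false_iff_ne]
                omega)]
            · rw [if_neg hkp, INV]
              rw [List.filter_eq_self.mpr ?_]
              intro c hc
              obtain ⟨x, hx, hxc⟩ := List.mem_map.mp hc
              obtain ⟨hxm, hxp⟩ := List.mem_filter.mp hx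
              obtain ⟨⟨hxu2, hxne2⟩, hxk2⟩ :
                  ((used.getD x.2 false = false) ∧ x.1 ≠ []) ∧ x.1 = key := by
                simpa [List.isEmpty_eq_false_iff] using hxp
              simp only [Bool.not_eq_eq_eq_not, Bool.not_true, beq_eq_false_iff_ne]
              intro hcj
              have hx2 : x.2 = j0 := by
                rw [← hxc] at hcj
                exact_mod_cast hcj
              have hxeq : x = (p0, j0) :=
                List.inj_on_of_nodup_map (pvZipIdx_nodup source) hxm hmem0 hx2
              rw [hxeq] at hxk2
              exact hkp hxk2.symm
    · rw [pvLoopA, pvLoopB]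
      simp [h1]

-- the lengths list built by B covers every nonempty piece's length
theorem pvLengths_mem (source : List (List Int)) :
    ∀ p ∈ source, p ≠ [] → ((p.length : Nat) : Int) ∈ pvLengths source := by
  intro p hp hne
  rw [pvLengths, PySem.List.mem_sorted]
  refine (PySem.Set.mem_ofList _ _).mpr ?_
  refine List.mem_filterMap.mpr ⟨p, hp, ?_⟩
  rw [if_neg (by simpa using hne)]

-- ===== VERDICT (by name: the statement is the Claim_ definition above) =====
theorem array_formation_spec : Claim_equal_array_formation := by
  intro source target _
  unfold Spec_array_formation array_formation array_formation_alt
  exact pvLoops_eq source target (pvLengths source) (pvLengths_mem source)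
    (pvLengths_pos source) target.length 0 (List.replicate source.length false)
    (pvTable source) (by omega) List.length_replicate
    (fun key => pvTable_getD source key)
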